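-- pv_equiv track=rewrite | github.com/DakeQQ/Voice-Activity-Detection-VAD-ONNX | FSMN/Inference_FSMN_VAD_ONNX.py | vad_to_timestamps
-- ===== SOURCE A (Python) =====
-- def vad_to_timestamps(vad_output, frame_duration):
--     timestamps = []
--     start = None
--     # Extract raw timestamps
--     for i, silence in enumerate(vad_output):
--         if silence:
--             if start is not None:  # End of the current speaking segment
--                 end = i * frame_duration + frame_duration
--                 timestamps.append((start, end))
--                 start = None
--         else:
--             if start is None:  # Start of a new speaking segment
--                 start = i * frame_duration
--     # Handle the case where speech continues until the end
--     if start is not None: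
--         timestamps.append((start, len(vad_output) * frame_duration))
--     return timestamps
-- ===== SOURCE B (Python) =====
-- def vad_to_timestamps(vad_output, frame_duration):
--     # Run-based scan: skip silence runs, emit one segment per speech run.
--     n = len(vad_output)
--     timestamps = []
--     i = 0
--     while i < n:
--         if vad_output[i]:
--             i += 1
--             continue
--         j = i + 1
--         while j < n and not vad_output[j]:
--             j += 1
--         end = (j + 1) * frame_duration if j < n else n * frame_duration
--         timestamps.append((i * frame_duration, end))
--         i = j
--     return timestamps
-- ===== Notes on version B (the rewrite author's own statement) =====
-- stated objective: alternative
-- what changed: Replaced the start/None toggle state machine over enumerate with a two-pointer run scan: skip each silence run, locate the end of each speech run with an inner scan, and emit the segment in one step.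
import Mathlib
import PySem

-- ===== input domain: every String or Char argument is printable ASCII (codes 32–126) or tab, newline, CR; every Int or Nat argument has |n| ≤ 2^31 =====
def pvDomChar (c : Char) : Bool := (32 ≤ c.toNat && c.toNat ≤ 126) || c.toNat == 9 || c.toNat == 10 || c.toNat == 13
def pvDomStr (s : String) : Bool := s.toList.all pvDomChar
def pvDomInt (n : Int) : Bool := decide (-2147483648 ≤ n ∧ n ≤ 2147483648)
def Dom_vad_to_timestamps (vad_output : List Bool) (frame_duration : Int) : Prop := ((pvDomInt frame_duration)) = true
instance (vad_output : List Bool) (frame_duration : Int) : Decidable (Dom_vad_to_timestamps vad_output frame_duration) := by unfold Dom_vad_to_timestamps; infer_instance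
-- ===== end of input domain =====

-- B replaces A's start/None toggle state machine with a run scan (skip a silence run,
-- scan to the end of each speech run, emit the segment at once); same O(n) cost.

-- ===== PORT A =====
-- A's for-loop over enumerate(vad_output), carrying (timestamps, start) and the index i.
def vadALoop (fd : Int) : List Bool → Int → List (Int × Int) → Option Int →
    (List (Int × Int) × Option Int)
  | [], _, ts, start => (ts, start)
  | silence :: rest, i, ts, start =>
    if silence then
      match start with
      | some s0 => vadALoop fd rest (i + 1) (ts ++ [(s0, i * fd + fd)]) none
      | none => vadALoop fd rest (i + 1) ts none
    else
      match start with
      | none => vadALoop fd rest (i + 1) ts (some (i * fd))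
      | some _ => vadALoop fd rest (i + 1) ts start

def vad_to_timestamps (vad_output : List Bool) (frame_duration : Int) : List (Int × Int) :=
  match vadALoop frame_duration vad_output 0 [] none with
  | (ts, some s0) => ts ++ [(s0, (vad_output.length : Int) * frame_duration)]
  | (ts, none) => ts

-- ===== PORT B =====
-- B's inner while loop: length of the leading speech (False) run.
def speechLen : List Bool → Nat
  | [] => 0
  | b :: rest => if b then 0 else speechLen rest + 1

-- B's outer while loop: skip silence frames, emit one segment per speech run.
def vadBLoop (n fd : Int) : List Bool → Int → List (Int × Int)
  | [], _ => []
  | b :: rest, i =>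
    if b then vadBLoop n fd rest (i + 1)
    else
      let j := i + 1 + (speechLen rest : Int)
      let e := if j < n then (j + 1) * fd else n * fd
      (i * fd, e) :: vadBLoop n fd (rest.drop (speechLen rest)) j
termination_by l _ => l.length
decreasing_by
  all_goals simp only [List.length_drop, List.length_cons]
  all_goals omega

def vad_to_timestamps_alt (vad_output : List Bool) (frame_duration : Int) : List (Int × Int) :=
  vadBLoop (vad_output.length : Int) frame_duration vad_output 0

-- ===== PRECONDITION & SPEC =====
def Spec_vad_to_timestamps (vad_output : List Bool) (frame_duration : Int) (out : List (Int × Int)) : Prop := out = vad_to_timestamps_alt vad_output frame_duration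
instance (vad_output : List Bool) (frame_duration : Int) (out : List (Int × Int)) : Decidable (Spec_vad_to_timestamps vad_output frame_duration out) := by unfold Spec_vad_to_timestamps; infer_instance

-- ===== CLAIM (what is proved, stated in full; the proofs are below) =====
def Claim_equal_vad_to_timestamps : Prop := ∀ (vad_output : List Bool) (frame_duration : Int), Dom_vad_to_timestamps vad_output frame_duration → Spec_vad_to_timestamps vad_output frame_duration (vad_to_timestamps vad_output frame_duration)

-- ===== LEMMAS AND PROOFS =====

lemma speechLen_true (rest : List Bool) : speechLen (true :: rest) = 0 := rfl
lemma speechLen_false (rest : List Bool) : speechLen (false :: rest) = speechLen rest + 1 := rfl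

-- equation lemmas for the well-founded recursion vadBLoop
lemma vadBLoop_nil (n fd i : Int) : vadBLoop n fd [] i = [] := by
  rw [vadBLoop]

lemma vadBLoop_true (n fd i : Int) (rest : List Bool) :
    vadBLoop n fd (true :: rest) i = vadBLoop n fd rest (i + 1) := by
  rw [vadBLoop]; simp

lemma vadBLoop_false (n fd i : Int) (rest : List Bool) :
    vadBLoop n fd (false :: rest) i =
      (i * fd,
        if i + 1 + (speechLen rest : Int) < n then (i + 1 + (speechLen rest : Int) + 1) * fd
        else n * fd) ::
      vadBLoop n fd (rest.drop (speechLen rest)) (i + 1 + (speechLen rest : Int)) := by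
  rw [vadBLoop]; simp

-- A's post-loop fixup ("speech continues until the end").
def finishA (n fd : Int) : List (Int × Int) × Option Int → List (Int × Int)
  | (ts, some s0) => ts ++ [(s0, n * fd)]
  | (ts, none) => ts

-- What B contributes for the remaining suffix, given A's current start state.
def tailB (n fd : Int) (l : List Bool) (i : Int) : Option Int → List (Int × Int)
  | none => vadBLoop n fd l i
  | some s0 =>
      let k := i + (speechLen l : Int)
      let e := if (speechLen l : Int) < (l.length : Int) then (k + 1) * fd else n * fd
      (s0, e) :: vadBLoop n fd (l.drop (speechLen l)) k

lemma loop_eq (fd : Int) (l : List Bool) :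
    ∀ (n i : Int) (ts : List (Int × Int)) (start : Option Int),
      n = i + (l.length : Int) →
      finishA n fd (vadALoop fd l i ts start) = ts ++ tailB n fd l i start := by
  induction l with
  | nil =>
      intro n i ts start hn
      cases start with
      | none => simp [vadALoop, finishA, tailB, vadBLoop_nil]
      | some s0 => simp [vadALoop, finishA, tailB, vadBLoop_nil, speechLen]
  | cons b rest ih =>
      intro n i ts start hn
      have hn' : n = (i + 1) + (rest.length : Int) := by
        simp at hn; omega
      have hcond : ((speechLen rest : Int) < (rest.length : Int)) ↔
          (i + 1 + (speechLen rest : Int) < n) := by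
        rw [hn']; constructor <;> intro h <;> omega
      cases b with
      | true =>
          cases start with
          | none =>
              rw [show vadALoop fd (true :: rest) i ts none
                    = vadALoop fd rest (i + 1) ts none from rfl]
              rw [ih n (i + 1) ts none hn']
              simp only [tailB]
              rw [vadBLoop_true]
          | some s0 =>
              rw [show vadALoop fd (true :: rest) i ts (some s0)
                    = vadALoop fd rest (i + 1) (ts ++ [(s0, i * fd + fd)]) none from rfl]
              rw [ih n (i + 1) (ts ++ [(s0, i * fd + fd)]) none hn']
              simp only [tailB, speechLen_true, Nat.cast_zero, add_zero,
                List.drop_zero, List.append_assoc, List.cons_append, List.nil_append]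
              rw [vadBLoop_true]
              rw [if_pos (show (0 : Int) < ((true :: rest).length : Int) by
                exact_mod_cast Nat.succ_pos rest.length)]
              have he : i * fd + fd = (i + 1) * fd := by ring
              rw [he]
      | false =>
          cases start with
          | none =>
              rw [show vadALoop fd (false :: rest) i ts none
                    = vadALoop fd rest (i + 1) ts (some (i * fd)) from rfl]
              rw [ih n (i + 1) ts (some (i * fd)) hn']
              simp only [tailB, vadBLoop_false]
              congr 2
              by_cases h : (speechLen rest : Int) < (rest.length : Int)
              · rw [if_pos h, if_pos (hcond.mp h)]
              · rw [if_neg h, if_neg (fun hh => h (hcond.mpr hh))]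
          | some s0 =>
              rw [show vadALoop fd (false :: rest) i ts (some s0)
                    = vadALoop fd rest (i + 1) ts (some s0) from rfl]
              rw [ih n (i + 1) ts (some s0) hn']
              simp only [tailB, speechLen_false, List.drop_succ_cons, List.length_cons]
              have hc1 : ((speechLen rest + 1 : Nat) : Int) < ((rest.length + 1 : Nat) : Int) ↔
                  (speechLen rest : Int) < (rest.length : Int) := by
                push_cast; omega
              have hi : i + ((speechLen rest + 1 : Nat) : Int) = i + 1 + (speechLen rest : Int) := by
                push_cast; ring
              congr 2
              · by_cases h : (speechLen rest : Int) < (rest.length : Int)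
                · rw [if_pos h, if_pos (hc1.mpr h)]
                  rw [hi]
                · rw [if_neg h, if_neg (fun hh => h (hc1.mp hh))]
              · rw [hi]

-- ===== VERDICT (by name: the statement is the Claim_ definition above) =====
theorem vad_to_timestamps_spec : Claim_equal_vad_to_timestamps := by
  intro l fd _
  unfold Spec_vad_to_timestamps vad_to_timestamps vad_to_timestamps_alt
  have h := loop_eq fd l (l.length : Int) 0 [] none (by omega)
  simp [tailB] at h
  rw [← h]
  rcases hsplit : vadALoop fd l 0 [] none with ⟨ts, start⟩
  cases start <;> simp [finishA]
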